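-- pv_equiv track=rewrite | github.com/the-aljaz/VegovaChessBot | SAH/CheckCoords.py | Piece_height
-- ===== SOURCE A (Python) =====
-- squares = {
--         "a8": "1", "a7": "9" , "a6": "17", "a5": "25", "a4": "33", "a3": "41", "a2": "49", "a1": "57",
--         "b8": "2", "b7": "10", "b6": "18", "b5": "26", "b4": "34", "b3": "42", "b2": "50", "b1": "58",
--         "c8": "3", "c7": "11", "c6": "19", "c5": "27", "c4": "35", "c3": "43", "c2": "51", "c1": "59",
--         "d8": "4", "d7": "12", "d6": "20", "d5": "28", "d4": "36", "d3": "44", "d2": "52", "d1": "60",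
--         "e8": "5", "e7": "13", "e6": "21", "e5": "29", "e4": "37", "e3": "45", "e2": "53", "e1": "61",
--         "f8": "6", "f7": "14", "f6": "22", "f5": "30", "f4": "38", "f3": "46", "f2": "54", "f1": "62",
--         "g8": "7", "g7": "15", "g6": "23", "g5": "31", "g4": "39", "g3": "47", "g2": "55", "g1": "63",
--         "h8": "8", "h7": "16", "h6": "24", "h5": "32", "h4": "40", "h3": "48", "h2": "56", "h1": "64",
--     } #Ta dict nam ko mu damo polje povee njegovo mesto v arrayu povecano za 1. Zakaj povecano za 1? \_(*-*)_/
--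
-- def Piece_height(fen, square): #Pričakuje FEN z števili namesto ničel
--
--     temp1 = ""
--
--     for i in fen:
--         if i.isalpha() == True:
--             temp1+=i
--         elif i.isnumeric()== True:
--             for i in range(int(i)):
--                 temp1+="0"
--
--     if temp1[int(squares[square])-1].lower() == "q" or temp1[int(squares[square])-1].lower() == "k": #Za kralja in kraljico se spusti 120mm
--         return "120"
--     elif temp1[int(squares[square])-1].lower() == "b" or temp1[int(squares[square])-1].lower() == "n": #Za konja in tekača se susti 140mm
--
--         return "140"
--
--     else: #Za vse ostale se spusti 164mm
--
--         return "164"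
-- ===== SOURCE B (Python) =====
-- def Piece_height(fen, square):
--     # Compute the board index arithmetically from the square name instead of the
--     # module's squares dict, and stream over the FEN with a countdown instead of
--     # materialising the expanded board string.
--     f, r = square
--     file = "abcdefgh".index(f)
--     rank = "12345678".index(r)
--     remaining = (7 - rank) * 8 + file
--     for c in fen:
--         if c.isalpha():
--             if remaining == 0:
--                 ch = c.lower()
--                 if ch in "qk":
--                     return "120"
--                 if ch in "bn":
--                     return "140"
--                 return "164"
--             remaining -= 1
--         elif c.isnumeric():
--             d = int(c)
--             if remaining < d:
--                 return "164"  # the target slot is one of the empty squares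
--             remaining -= d
--     raise IndexError("string index out of range")
-- ===== Notes on version B (the rewrite author's own statement) =====
-- stated objective: alternative
-- what changed: B derives the target board index arithmetically from the square's file/rank characters (no squares dict) and streams over the FEN with a running countdown, returning the height as soon as the target slot is reached, instead of materialising the full expanded board string, indexing it via the dict, and dispatching on the letter.
import Mathlib
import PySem

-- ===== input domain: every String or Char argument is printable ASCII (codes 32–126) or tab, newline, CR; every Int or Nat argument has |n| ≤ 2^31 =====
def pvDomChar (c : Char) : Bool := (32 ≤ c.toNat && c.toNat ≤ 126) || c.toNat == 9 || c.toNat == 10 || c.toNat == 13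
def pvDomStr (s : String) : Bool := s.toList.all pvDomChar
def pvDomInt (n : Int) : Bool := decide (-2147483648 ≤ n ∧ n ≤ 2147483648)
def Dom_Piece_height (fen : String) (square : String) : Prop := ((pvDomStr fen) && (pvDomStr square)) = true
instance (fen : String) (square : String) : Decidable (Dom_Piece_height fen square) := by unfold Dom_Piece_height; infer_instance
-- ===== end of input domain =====

-- B computes the target board index arithmetically from the square name (no squares dict)
-- and streams over the FEN with a countdown instead of building the expanded board string
-- (objective: alternative).

-- int(c) for a single character c; exact whenever PySem.Chars.isdigit c (the only place it is used).
def pvDigitVal (c : Char) : Int := (c.toNat : Int) - 48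

-- ===== PORT A =====
-- the squares dict of the Python module (used by A; B does not use it)
def pvSquares : PySem.Dict String String := PySem.Dict.mk [
    ("a8", "1"), ("a7", "9"), ("a6", "17"), ("a5", "25"), ("a4", "33"), ("a3", "41"), ("a2", "49"), ("a1", "57"),
    ("b8", "2"), ("b7", "10"), ("b6", "18"), ("b5", "26"), ("b4", "34"), ("b3", "42"), ("b2", "50"), ("b1", "58"),
    ("c8", "3"), ("c7", "11"), ("c6", "19"), ("c5", "27"), ("c4", "35"), ("c3", "43"), ("c2", "51"), ("c1", "59"),
    ("d8", "4"), ("d7", "12"), ("d6", "20"), ("d5", "28"), ("d4", "36"), ("d3", "44"), ("d2", "52"), ("d1", "60"),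
    ("e8", "5"), ("e7", "13"), ("e6", "21"), ("e5", "29"), ("e4", "37"), ("e3", "45"), ("e2", "53"), ("e1", "61"),
    ("f8", "6"), ("f7", "14"), ("f6", "22"), ("f5", "30"), ("f4", "38"), ("f3", "46"), ("f2", "54"), ("f1", "62"),
    ("g8", "7"), ("g7", "15"), ("g6", "23"), ("g5", "31"), ("g4", "39"), ("g3", "47"), ("g2", "55"), ("g1", "63"),
    ("h8", "8"), ("h7", "16"), ("h6", "24"), ("h5", "32"), ("h4", "40"), ("h3", "48"), ("h2", "56"), ("h1", "64")]

def Piece_height (fen : String) (square : String) : String :=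
  let temp1 : List Char := fen.toList.foldl (fun acc i =>
    if PySem.Chars.isalpha i = true then acc ++ [i]
    else if PySem.Chars.isdigit i = true then
      -- for i in range(int(i)): temp1 += "0"
      (PySem.List.pyRange 0 (pvDigitVal i) 1).foldl (fun a _ => a ++ ['0']) acc
    else acc) []
  -- temp1[int(squares[square])-1].lower(), compared against the four letters; the getD
  -- defaults are unreachable under Pre_ (Python raises KeyError / IndexError there).
  let ch : Char := PySem.Chars.lowerChar
    (PySem.List.pyGetD temp1 ((PySem.Int.ofStr? ((pvSquares.get? square).getD "")).getD 0 - 1) ' ')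
  if ch = 'q' ∨ ch = 'k' then "120"
  else if ch = 'b' ∨ ch = 'n' then "140"
  else "164"

-- ===== PORT B =====
-- ch in "qk" / ch in "bn" dispatch of Source B
def pvHeightOf (ch : Char) : String :=
  if ("qk".toList).contains ch then "120"
  else if ("bn".toList).contains ch then "140"
  else "164"

-- the streaming loop of Source B: walk the FEN keeping the number of slots still to skip;
-- none = the loop falls through (Source B raises IndexError there)
def pvScan : List Char → Int → Option String
  | [], _ => none
  | c :: cs, remaining =>
    if PySem.Chars.isalpha c then
      if remaining = 0 then some (pvHeightOf (PySem.Chars.lowerChar c))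
      else pvScan cs (remaining - 1)
    else if PySem.Chars.isdigit c then
      if remaining < pvDigitVal c then some "164"
      else pvScan cs (remaining - pvDigitVal c)
    else pvScan cs remaining

def Piece_height_alt (fen : String) (square : String) : String :=
  match square.toList with
  | [f, r] =>
    match PySem.List.index? "abcdefgh".toList f, PySem.List.index? "12345678".toList r with
    | some file, some rank =>
      (match pvScan fen.toList ((7 - (rank : Int)) * 8 + (file : Int)) with
       | some h => h
       | none => "")  -- unreachable under Pre_: Source B raises IndexError
    | _, _ => ""      -- unreachable under Pre_: Source B raises ValueError from .index
  | _ => ""           -- unreachable under Pre_: Source B raises ValueError unpacking square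

-- ===== PRECONDITION & SPEC =====
-- number of board slots the FEN expands to (letters count 1, digits their value)
def pvExpLen : List Char → Int
  | [] => 0
  | c :: cs =>
    (if PySem.Chars.isalpha c then 1 else if PySem.Chars.isdigit c then pvDigitVal c else 0)
      + pvExpLen cs

-- Pre_ excludes exactly the inputs where Python A raises: KeyError (square not a key of
-- squares) and IndexError (the target slot lies beyond the expanded board).
def Pre_Piece_height (fen : String) (square : String) : Prop :=
  ((pvSquares.get? square).bind PySem.Int.ofStr?).isSome = true ∧
  0 ≤ ((pvSquares.get? square).bind PySem.Int.ofStr?).getD 0 - 1 ∧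
  ((pvSquares.get? square).bind PySem.Int.ofStr?).getD 0 - 1 < pvExpLen fen.toList
instance (fen : String) (square : String) : Decidable (Pre_Piece_height fen square) := by
  unfold Pre_Piece_height; infer_instance

def pvWitness_Piece_height : String × String := ("q7/8/8/8/8/8/8/8", "a8")

def Spec_Piece_height (fen : String) (square : String) (out : String) : Prop := out = Piece_height_alt fen square
instance (fen : String) (square : String) (out : String) : Decidable (Spec_Piece_height fen square out) := by unfold Spec_Piece_height; infer_instance

-- ===== CLAIM (what is proved, stated in full; the proofs are below) =====
def Claim_equal_Piece_height : Prop := ∀ (fen : String) (square : String), Dom_Piece_height fen square → Pre_Piece_height fen square → Spec_Piece_height fen square (Piece_height fen square)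

-- ===== LEMMAS AND PROOFS =====

-- what one FEN character contributes to the expanded board
def pvExpandChar (c : Char) : List Char :=
  if PySem.Chars.isalpha c then [c]
  else if PySem.Chars.isdigit c then List.replicate (pvDigitVal c).toNat '0' else []

-- the arithmetic target index that Source B computes from the square name (proof helper)
def pvAltTarget (square : String) : Option Int :=
  match square.toList with
  | [f, r] =>
    match PySem.List.index? "abcdefgh".toList f, PySem.List.index? "12345678".toList r with
    | some file, some rank => some ((7 - (rank : Int)) * 8 + (file : Int))
    | _, _ => none
  | _ => none

theorem pv_digit_bounds {c : Char} (h : PySem.Chars.isdigit c = true) :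
    0 ≤ pvDigitVal c ∧ pvDigitVal c ≤ 9 := by
  simp only [PySem.Chars.isdigit, Bool.and_eq_true, decide_eq_true_eq] at h
  obtain ⟨h1, h2⟩ := h
  have h3 := UInt32.le_iff_toNat_le.mp (Char.le_def.mp h1)
  have h4 := UInt32.le_iff_toNat_le.mp (Char.le_def.mp h2)
  have e : c.toNat = c.val.toNat := rfl
  have e1 : ('0':Char).val.toNat = 48 := rfl
  have e2 : ('9':Char).val.toNat = 57 := rfl
  unfold pvDigitVal
  omega

theorem pv_foldl_zeros (l : List Int) (acc : List Char) :
    l.foldl (fun a _ => a ++ ['0']) acc = acc ++ List.replicate l.length '0' := by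
  induction l generalizing acc with
  | nil => simp
  | cons x xs ih =>
    rw [List.foldl_cons, ih, List.length_cons, List.replicate_succ]
    simp

theorem pv_step_expandChar (acc : List Char) (c : Char) :
    (if PySem.Chars.isalpha c = true then acc ++ [c]
     else if PySem.Chars.isdigit c = true then
       (PySem.List.pyRange 0 (pvDigitVal c) 1).foldl (fun a _ => a ++ ['0']) acc
     else acc) = acc ++ pvExpandChar c := by
  unfold pvExpandChar
  by_cases ha : PySem.Chars.isalpha c = true
  · simp [ha]
  · by_cases hd : PySem.Chars.isdigit c = true
    · simp only [ha, hd, if_true]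
      rw [pv_foldl_zeros, PySem.List.length_pyRange_one]
      norm_num
    · simp [ha, hd]

theorem pv_foldl_expand (cs : List Char) (acc : List Char) :
    cs.foldl (fun acc i =>
      if PySem.Chars.isalpha i = true then acc ++ [i]
      else if PySem.Chars.isdigit i = true then
        (PySem.List.pyRange 0 (pvDigitVal i) 1).foldl (fun a _ => a ++ ['0']) acc
      else acc) acc = acc ++ cs.flatMap pvExpandChar := by
  induction cs generalizing acc with
  | nil => simp
  | cons c cs ih =>
    rw [List.foldl_cons, pv_step_expandChar, ih, List.flatMap_cons, List.append_assoc]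

theorem pv_expLen_eq (cs : List Char) : pvExpLen cs = ((cs.flatMap pvExpandChar).length : Int) := by
  induction cs with
  | nil => simp [pvExpLen]
  | cons c cs ih =>
    rw [List.flatMap_cons]
    simp only [pvExpLen, List.length_append, ih, pvExpandChar]
    by_cases ha : PySem.Chars.isalpha c = true
    · simp [ha]
    · by_cases hd : PySem.Chars.isdigit c = true
      · have := (pv_digit_bounds hd).1
        simp [ha, hd]
        omega
      · simp [ha, hd]

-- the streaming scan of B lands on the same character as A's expanded-board indexing
theorem pv_scan_eq (cs : List Char) (r : Int) (hr : 0 ≤ r) :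
    pvScan cs r = ((cs.flatMap pvExpandChar)[r.toNat]?).map
      (fun c => pvHeightOf (PySem.Chars.lowerChar c)) := by
  induction cs generalizing r with
  | nil => simp [pvScan]
  | cons c cs ih =>
    rw [List.flatMap_cons]
    simp only [pvScan, pvExpandChar]
    by_cases ha : PySem.Chars.isalpha c = true
    · simp only [ha, if_true]
      by_cases h0 : r = 0
      · simp [h0]
      · rw [if_neg h0, ih (r - 1) (by omega)]
        have hh : r.toNat = (r - 1).toNat + 1 := by omega
        rw [List.singleton_append, hh, List.getElem?_cons_succ]
    · by_cases hd : PySem.Chars.isdigit c = true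
      · have hdn := (pv_digit_bounds hd).1
        simp only [ha, hd, if_true, if_false, Bool.false_eq_true]
        by_cases hlt : r < pvDigitVal c
        · rw [if_pos hlt,
            List.getElem?_append_left (by rw [List.length_replicate]; omega)]
          rw [List.getElem?_replicate, if_pos (by omega)]
          rfl
        · rw [if_neg hlt, ih (r - pvDigitVal c) (by omega),
            List.getElem?_append_right (by simp only [List.length_replicate]; omega)]
          congr 2
          simp only [List.length_replicate]
          omega
      · simp only [ha, hd, if_false, Bool.false_eq_true, List.nil_append]
        exact ih r hr

-- for every key of the squares dict, B's arithmetic index equals A's dict value minus one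
theorem pv_target (square : String) (h : square ∈ pvSquares.keys) :
    pvAltTarget square = ((pvSquares.get? square).bind PySem.Int.ofStr?).map (· - 1) := by
  simp only [pvSquares, PySem.Dict.keys_mk] at h
  fin_cases h <;> decide

theorem pv_heightOf_eq (c : Char) :
    pvHeightOf c =
      if c = 'q' ∨ c = 'k' then "120" else if c = 'b' ∨ c = 'n' then "140" else "164" := by
  unfold pvHeightOf
  by_cases h1 : c = 'q' <;> by_cases h2 : c = 'k' <;> by_cases h3 : c = 'b'
    <;> by_cases h4 : c = 'n' <;> simp_all [eq_comm]

-- ===== VERDICT (by name: the statement is the Claim_ definition above) =====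
set_option maxHeartbeats 1000000 in
theorem Piece_height_spec : Claim_equal_Piece_height := by
  intro fen square _ hPre
  obtain ⟨hs, h0, hlt⟩ := hPre
  rw [Option.isSome_iff_exists] at hs
  obtain ⟨v, hv⟩ := hs
  rw [hv, Option.getD_some] at h0 hlt
  unfold Spec_Piece_height Piece_height Piece_height_alt
  obtain ⟨s, hg, hvs⟩ : ∃ s, pvSquares.get? square = some s ∧ PySem.Int.ofStr? s = some v := by
    cases hg : pvSquares.get? square with
    | none => rw [hg] at hv; simp at hv
    | some s => rw [hg] at hv; simp at hv; exact ⟨s, rfl, hv⟩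
  have hmem : square ∈ pvSquares.keys := by
    rw [← PySem.Dict.contains_iff_mem_keys, PySem.Dict.contains_eq_isSome_get?, hg]; rfl
  have hT : pvAltTarget square = some (v - 1) := by
    rw [pv_target square hmem, hv]; rfl
  have hidx : (PySem.Int.ofStr? ((pvSquares.get? square).getD "")).getD 0 - 1 = v - 1 := by
    rw [hg]; simp [hvs]
  rw [pv_expLen_eq] at hlt
  have hget : PySem.List.pyGetD (fen.toList.flatMap pvExpandChar) (v - 1) ' '
      = (fen.toList.flatMap pvExpandChar)[(v - 1).toNat]'(by omega) :=
    PySem.List.pyGetD_eq_getElem _ _ h0 (by omega)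
  have hscan : pvScan fen.toList (v - 1)
      = some (pvHeightOf (PySem.Chars.lowerChar
          ((fen.toList.flatMap pvExpandChar)[(v - 1).toNat]'(by omega)))) := by
    rw [pv_scan_eq _ _ h0, List.getElem?_eq_getElem (by omega)]; rfl
  unfold pvAltTarget at hT
  split at hT
  case h_2 => exact absurd hT (by simp)
  case h_1 f r heq =>
    split at hT
    case h_2 => exact absurd hT (by simp_all)
    case h_1 file rank hf hr =>
      rw [Option.some_inj] at hT
      rw [hT, hscan]
      simp only [hidx, pv_foldl_expand, List.nil_append, hget, pv_heightOf_eq]
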